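-- pv_equiv track=rewrite | github.com/AWilentz/cs124-progset3 | numberpartition.py | residue
-- ===== SOURCE A (Python) =====
-- def residue(A, S):
--     s1 = 0
--     s2 = 0
--     for i, s in enumerate(S):
--         if s == 1:
--             s1 += A[i]
--         else:
--             s2 += A[i]
--     return abs(s1 - s2)
-- ===== SOURCE B (Python) =====
-- def residue(A, S):
--     total = sum(A[i] for i, _ in enumerate(S))
--     s1 = sum(A[i] for i, s in enumerate(S) if s == 1)
--     return abs(2 * s1 - total)
-- ===== Notes on version B (the rewrite author's own statement) =====
-- stated objective: alternative
-- what changed: Replaces the single loop maintaining two group accumulators by two independent sums (total over S's indices and the s==1 group), returning abs(2*s1 - total) via the identity s2 = total - s1.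
import Mathlib
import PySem

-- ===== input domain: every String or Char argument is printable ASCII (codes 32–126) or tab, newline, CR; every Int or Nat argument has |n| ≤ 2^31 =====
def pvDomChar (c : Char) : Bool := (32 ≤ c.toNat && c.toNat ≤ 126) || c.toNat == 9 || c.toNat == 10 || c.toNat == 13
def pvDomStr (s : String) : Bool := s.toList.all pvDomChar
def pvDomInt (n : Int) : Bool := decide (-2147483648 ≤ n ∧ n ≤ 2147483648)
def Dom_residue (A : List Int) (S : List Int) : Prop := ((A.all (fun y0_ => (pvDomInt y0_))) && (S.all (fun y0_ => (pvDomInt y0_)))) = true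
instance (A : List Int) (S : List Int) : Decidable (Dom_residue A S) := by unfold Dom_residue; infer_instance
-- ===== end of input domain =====

-- B computes the two group sums as two independent passes (total and the s==1 sum)
-- and returns |2*s1 - total|; A keeps both accumulators in one loop. Objective: alternative.


-- ===== PORT A =====
-- one loop over enumerate(S) maintaining the two accumulators (s1, s2)
def residue (A : List Int) (S : List Int) : Int :=
  let st := (PySem.List.enumerate S).foldl
    (fun (p : Int × Int) (is : Int × Int) =>
      let a := (PySem.List.pyGet? A is.1).getD 0   -- A[i]; Pre_ guarantees in range
      if is.2 == 1 then (p.1 + a, p.2) else (p.1, p.2 + a))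
    (0, 0)
  |st.1 - st.2|

-- ===== PORT B =====
-- two independent sums, then the identity s2 = total - s1
def residue_alt (A : List Int) (S : List Int) : Int :=
  let total := (PySem.List.enumerate S).foldl
    (fun (t : Int) (is : Int × Int) => t + (PySem.List.pyGet? A is.1).getD 0) 0
  let s1 := (PySem.List.enumerate S).foldl
    (fun (t : Int) (is : Int × Int) =>
      if is.2 == 1 then t + (PySem.List.pyGet? A is.1).getD 0 else t) 0
  |2 * s1 - total|

-- ===== PRECONDITION & SPEC =====
-- Pre_ excludes exactly the inputs with len(S) > len(A), on which both A and B raise IndexError at A[i].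
def Pre_residue (A : List Int) (S : List Int) : Prop := S.length ≤ A.length
instance (A : List Int) (S : List Int) : Decidable (Pre_residue A S) := by unfold Pre_residue; infer_instance
def pvWitness_residue : List Int × List Int := ([3, -1, 4], [1, 0, 1])

def Spec_residue (A : List Int) (S : List Int) (out : Int) : Prop := out = residue_alt A S
instance (A : List Int) (S : List Int) (out : Int) : Decidable (Spec_residue A S out) := by unfold Spec_residue; infer_instance

-- ===== CLAIM (what is proved, stated in full; the proofs are below) =====
def Claim_equal_residue : Prop := ∀ (A : List Int) (S : List Int), Dom_residue A S → Pre_residue A S → Spec_residue A S (residue A S)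

-- ===== LEMMAS AND PROOFS =====

-- initial-accumulator shift for B's conditional sum
theorem residue_foldS1_shift (A : List Int) (L : List (Int × Int)) (c : Int) :
    L.foldl (fun (t : Int) (is : Int × Int) =>
        if is.2 == 1 then t + (PySem.List.pyGet? A is.1).getD 0 else t) c
    = c + L.foldl (fun (t : Int) (is : Int × Int) =>
        if is.2 == 1 then t + (PySem.List.pyGet? A is.1).getD 0 else t) 0 := by
  induction L generalizing c with
  | nil => simp
  | cons hd tl ih =>
    simp only [List.foldl_cons]
    by_cases h : hd.2 == 1
    · simp only [h, ite_true]
      rw [ih, ih ((0 : Int) + _)]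
      ring
    · simp only [h, Bool.false_eq_true, ite_false]
      exact ih c

-- initial-accumulator shift for B's total sum
theorem residue_foldT_shift (A : List Int) (L : List (Int × Int)) (c : Int) :
    L.foldl (fun (t : Int) (is : Int × Int) => t + (PySem.List.pyGet? A is.1).getD 0) c
    = c + L.foldl (fun (t : Int) (is : Int × Int) => t + (PySem.List.pyGet? A is.1).getD 0) 0 := by
  induction L generalizing c with
  | nil => simp
  | cons hd tl ih =>
    simp only [List.foldl_cons]
    rw [ih, ih ((0 : Int) + _)]
    ring

-- A's fold from any accumulator splits into the two B-style sums
theorem residue_foldA (A : List Int) (L : List (Int × Int)) (a b : Int) :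
    (L.foldl (fun (p : Int × Int) (is : Int × Int) =>
        let x := (PySem.List.pyGet? A is.1).getD 0
        if is.2 == 1 then (p.1 + x, p.2) else (p.1, p.2 + x)) (a, b))
    = (a + L.foldl (fun (t : Int) (is : Int × Int) =>
          if is.2 == 1 then t + (PySem.List.pyGet? A is.1).getD 0 else t) 0,
       b + (L.foldl (fun (t : Int) (is : Int × Int) =>
          t + (PySem.List.pyGet? A is.1).getD 0) 0
          - L.foldl (fun (t : Int) (is : Int × Int) =>
          if is.2 == 1 then t + (PySem.List.pyGet? A is.1).getD 0 else t) 0)) := by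
  induction L generalizing a b with
  | nil => simp
  | cons hd tl ih =>
    simp only [List.foldl_cons]
    by_cases h : hd.2 == 1
    · simp only [h, ite_true]
      rw [ih, residue_foldS1_shift A tl ((0:Int) + _), residue_foldT_shift A tl ((0:Int) + _)]
      simp only [Prod.mk.injEq]; exact ⟨by ring, by ring⟩
    · simp only [h, Bool.false_eq_true, ite_false]
      rw [ih, residue_foldT_shift A tl ((0:Int) + _)]
      simp only [Prod.mk.injEq]
      exact ⟨trivial, by ring⟩

-- ===== VERDICT (by name: the statement is the Claim_ definition above) =====
theorem residue_spec : Claim_equal_residue := by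
  intro A S _ _
  unfold Spec_residue residue residue_alt
  rw [residue_foldA]
  simp only [zero_add]
  generalize (List.foldl _ 0 (PySem.List.enumerate S) : Int) = t
  generalize (List.foldl _ 0 (PySem.List.enumerate S) : Int) = s1
  congr 1
  ring
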